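-- pv_equiv track=rewrite | github.com/trmmo/Code_PTIT_Python | PY01055.py | check
-- ===== SOURCE A (Python) =====
-- def check(s):
--     if len(s) % 2 == 0:
--         return False
--     if s[0] == s[1]:
--         return False
--     for i in range(1, len(s)):
--         if i % 2 == 0 and s[i] != s[0]:
--             return False
--     return True
-- ===== SOURCE B (Python) =====
-- def check(s):
--     if len(s) % 2 == 0:
--         return False
--     if s[0] == s[1]:
--         return False
--     return all(c == s[0] for c in s[::2])
-- ===== Notes on version B (the rewrite author's own statement) =====
-- stated objective: simpler
-- what changed: Replaces the index loop over range(1, len(s)) with its i%2 filter by a direct all(...) pass over the even-position slice s[::2], traversing only the characters that matter.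
import Mathlib
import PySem

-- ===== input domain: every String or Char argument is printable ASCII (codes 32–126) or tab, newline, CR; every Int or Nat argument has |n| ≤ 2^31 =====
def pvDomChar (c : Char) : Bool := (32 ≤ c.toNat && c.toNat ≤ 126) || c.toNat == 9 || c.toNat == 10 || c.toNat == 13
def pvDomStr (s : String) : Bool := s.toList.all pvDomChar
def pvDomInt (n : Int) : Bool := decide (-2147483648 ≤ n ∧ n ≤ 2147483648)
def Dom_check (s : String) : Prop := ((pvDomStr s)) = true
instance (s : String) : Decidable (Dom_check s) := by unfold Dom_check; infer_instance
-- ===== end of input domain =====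

-- B replaces A's index loop with an all(...) pass over the even-position slice s[::2] (simpler; same cost).

-- ===== PORT A =====
def checkLoop (cs : List Char) (idxs : List Int) : Bool :=
  match idxs with
  | [] => true
  | i :: rest =>
      if PySem.Int.mod i 2 == 0 && !(PySem.List.pyGet? cs i == PySem.List.pyGet? cs 0) then
        false
      else
        checkLoop cs rest

def check (s : String) : Bool :=
  if PySem.Int.mod (PySem.Str.len s) 2 == 0 then false
  else if PySem.Str.pyGet? s 0 == PySem.Str.pyGet? s 1 then false
  else checkLoop s.toList (PySem.List.pyRange 1 (PySem.Str.len s) 1)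

-- ===== PORT B =====
def check_alt (s : String) : Bool :=
  if PySem.Int.mod (PySem.Str.len s) 2 == 0 then false
  else if PySem.Str.pyGet? s 0 == PySem.Str.pyGet? s 1 then false
  else ((PySem.List.slice? s.toList none none 2).getD []).all
        (fun c => some c == PySem.Str.pyGet? s 0)

-- ===== PRECONDITION & SPEC =====
-- Pre_ excludes only length-1 strings, on which A (and B alike) hits s[1] and raises IndexError.
def Pre_check (s : String) : Prop := s.toList.length ≠ 1
instance (s : String) : Decidable (Pre_check s) := by unfold Pre_check; infer_instance
def pvWitness_check : String := "aba"

def Spec_check (s : String) (out : Bool) : Prop := out = check_alt s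
instance (s : String) (out : Bool) : Decidable (Spec_check s out) := by unfold Spec_check; infer_instance

-- ===== CLAIM (what is proved, stated in full; the proofs are below) =====
def Claim_equal_check : Prop := ∀ (s : String), Dom_check s → Pre_check s → Spec_check s (check s)

-- ===== LEMMAS AND PROOFS =====

lemma checkLoop_eq_all (cs : List Char) (idxs : List Int) :
    checkLoop cs idxs = idxs.all (fun i =>
      !(PySem.Int.mod i 2 == 0 && !(PySem.List.pyGet? cs i == PySem.List.pyGet? cs 0))) := by
  induction idxs with
  | nil => rfl
  | cons i rest ih =>
    simp only [checkLoop, List.all_cons, ← ih]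
    cases hc : (PySem.Int.mod i 2 == 0
        && !(PySem.List.pyGet? cs i == PySem.List.pyGet? cs 0)) <;> simp

lemma tail_eq (cs : List Char) :
    checkLoop cs (PySem.List.pyRange 1 (cs.length : Int) 1)
      = ((PySem.List.slice? cs none none 2).getD []).all
          (fun c => some c == PySem.List.pyGet? cs 0) := by
  rw [checkLoop_eq_all]
  rcases Nat.eq_zero_or_pos cs.length with h0 | hpos
  · rw [List.eq_nil_of_length_eq_zero h0]; rfl
  · simp only [PySem.List.slice?, PySem.List.sliceIndices]
    norm_num [hpos]
    rw [Bool.eq_iff_iff]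
    simp only [List.all_eq_true, PySem.List.mem_pyRange_one, List.mem_range]
    have hC : ((((cs.length : Int)) + 2 - 1) / 2).toNat = (cs.length + 1) / 2 := by omega
    constructor
    · intro h k hk
      rw [hC] at hk
      have h2k : 2 * k < cs.length := by omega
      have ht : (2 * (k : Int)).toNat = 2 * k := by omega
      rw [ht, List.getElem?_eq_getElem h2k]
      rcases Nat.eq_zero_or_pos k with rfl | hkpos
      · simp
      · have h1 : (1 : Int) ≤ ((2 * k : Nat) : Int) := by omega
        have h2 : ((2 * k : Nat) : Int) < (cs.length : Int) := by omega
        have := h _ ⟨h1, h2⟩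
        have hm : ((2 * k : Nat) : Int) % 2 = 0 := by omega
        rw [PySem.List.pyGet?_natCast, List.getElem?_eq_getElem h2k, hm] at this
        simpa using this
    · intro h i ⟨h1, h2⟩
      by_cases hi : i % 2 = 0
      · have hk : i = ((2 * (i.toNat / 2) : Nat) : Int) := by omega
        set k := i.toNat / 2 with hkdef
        have hklt : k < ((((cs.length : Int)) + 2 - 1) / 2).toNat := by rw [hC]; omega
        have h2k : 2 * k < cs.length := by omega
        have := h k hklt
        have ht : (2 * (k : Int)).toNat = 2 * k := by omega
        rw [ht, List.getElem?_eq_getElem h2k] at this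
        rw [hk, PySem.List.pyGet?_natCast, List.getElem?_eq_getElem h2k]
        simpa using this
      · simp [hi]

-- ===== VERDICT (by name: the statement is the Claim_ definition above) =====
-- Pre_ (length ≠ 1) marks where Python raises; the total Lean ports agree there too, so it is not needed below.
theorem check_spec : Claim_equal_check := by
  intro s _ hpre
  unfold Spec_check check check_alt
  split_ifs with h1 h2
  · rfl
  · rfl
  · simpa [PySem.Str.len_eq] using tail_eq s.toList
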